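-- pv_equiv track=rewrite | github.com/TVS-LATAM/frappe | frappe/desk/doctype/kanban_board/kanban_board.py | order_column_by_project_order
-- ===== SOURCE A (Python) =====
-- def order_column_by_project_order(project_ordered, projects_to_order):
--     project_index_map = {}
--     for index, project in enumerate(project_ordered):
--         project_index_map[project["name"]] = index
--
--     ordered_projects = {}
--     for column, project_list in projects_to_order.items():
--         sorted_project_list = sorted(
--             project_list, key=lambda project: project_index_map.get(project, -1)
--         )
--         ordered_projects[column] = sorted_project_list
--
--     return ordered_projects
-- ===== SOURCE B (Python) =====
-- def order_column_by_project_order(project_ordered, projects_to_order):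
--     # Bucket distribution instead of a comparison sort: one pass per column.
--     rank = {p["name"]: i for i, p in enumerate(project_ordered)}
--     n = len(project_ordered)
--     result = {}
--     for column, project_list in projects_to_order.items():
--         buckets = [[] for _ in range(n)]
--         unknown = []
--         for p in project_list:
--             i = rank.get(p)
--             if i is None:
--                 unknown.append(p)
--             else:
--                 buckets[i].append(p)
--         result[column] = unknown + [p for b in buckets for p in b]
--     return result
-- ===== Notes on version B (the rewrite author's own statement) =====
-- stated objective: alternative
-- what changed: Replaces the per-column comparison sort keyed by reference rank with a single bucket-distribution pass: each project is appended to an 'unknown' list or to the bucket of its rank, and the column is unknown followed by the buckets in order.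
import Mathlib
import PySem

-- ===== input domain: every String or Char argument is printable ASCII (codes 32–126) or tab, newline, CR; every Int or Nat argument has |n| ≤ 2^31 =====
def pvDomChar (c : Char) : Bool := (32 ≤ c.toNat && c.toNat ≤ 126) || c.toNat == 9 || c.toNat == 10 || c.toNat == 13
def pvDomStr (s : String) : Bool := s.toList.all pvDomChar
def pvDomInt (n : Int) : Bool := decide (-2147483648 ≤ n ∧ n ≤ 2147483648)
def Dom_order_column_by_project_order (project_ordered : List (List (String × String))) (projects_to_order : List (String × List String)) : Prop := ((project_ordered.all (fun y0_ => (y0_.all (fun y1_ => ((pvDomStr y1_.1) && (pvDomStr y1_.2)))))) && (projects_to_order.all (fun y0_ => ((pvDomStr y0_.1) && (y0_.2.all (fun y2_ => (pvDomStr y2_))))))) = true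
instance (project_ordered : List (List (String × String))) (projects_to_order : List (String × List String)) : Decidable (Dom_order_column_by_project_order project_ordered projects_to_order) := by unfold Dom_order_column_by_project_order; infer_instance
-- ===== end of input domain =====

-- B replaces A's per-column comparison sort by a one-pass bucket distribution over the
-- reference ranks (unknown projects first, then the buckets in rank order).

-- ===== PORT A =====
-- project_index_map = {project["name"]: index}; project["name"] raises KeyError when the key
-- is absent (excluded by Pre_); the port uses getD "name" "" there.
def pvIndexMap (project_ordered : List (List (String × String))) : PySem.Dict String Int :=
  (PySem.List.enumerate project_ordered 0).foldl
    (fun d ip => d.insert ((PySem.Dict.ofList ip.2).getD "name" "") ip.1)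
    PySem.Dict.empty

def order_column_by_project_order (project_ordered : List (List (String × String))) (projects_to_order : List (String × List String)) : List (String × List String) :=
  let project_index_map := pvIndexMap project_ordered
  let ordered_projects : PySem.Dict String (List String) :=
    (PySem.Dict.ofList projects_to_order).items.foldl
      (fun out cp =>
        out.insert cp.1
          (PySem.List.sorted cp.2 (fun p => project_index_map.getD p (-1)) false))
      PySem.Dict.empty
  ordered_projects.items

-- ===== PORT B =====
-- one step of B's distribution loop: an unknown name is appended to st.1, a known name to
-- its rank's bucket in st.2
def pvBucketStep (rank : PySem.Dict String Int) (st : List String × List (List String)) (p : String) : List String × List (List String) :=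
  match rank.get? p with
  | none => (st.1 ++ [p], st.2)
  | some i => (st.1, st.2.modify i.toNat (· ++ [p]))

def order_column_by_project_order_alt (project_ordered : List (List (String × String))) (projects_to_order : List (String × List String)) : List (String × List String) :=
  let rank := pvIndexMap project_ordered
  let n := project_ordered.length
  let result : PySem.Dict String (List String) :=
    (PySem.Dict.ofList projects_to_order).items.foldl
      (fun out cp =>
        let ub := cp.2.foldl (pvBucketStep rank) ([], List.replicate n [])
        out.insert cp.1 (ub.1 ++ ub.2.flatten))
      PySem.Dict.empty
  result.items

-- ===== PRECONDITION & SPEC =====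
-- Pre_ excludes exactly the inputs on which Python A raises KeyError: a project dict in
-- project_ordered without a "name" key.
def Pre_order_column_by_project_order (project_ordered : List (List (String × String))) (projects_to_order : List (String × List String)) : Prop :=
  ∀ p ∈ project_ordered, (PySem.Dict.ofList p).contains "name" = true
instance (project_ordered : List (List (String × String))) (projects_to_order : List (String × List String)) : Decidable (Pre_order_column_by_project_order project_ordered projects_to_order) := by unfold Pre_order_column_by_project_order; infer_instance
def pvWitness_order_column_by_project_order : (List (List (String × String))) × (List (String × List String)) :=
  ([[("name", "a")], [("name", "b")]], [("Open", ["b", "x", "a", "b"])])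

def Spec_order_column_by_project_order (project_ordered : List (List (String × String))) (projects_to_order : List (String × List String)) (out : List (String × List String)) : Prop := out = order_column_by_project_order_alt project_ordered projects_to_order
instance (project_ordered : List (List (String × String))) (projects_to_order : List (String × List String)) (out : List (String × List String)) : Decidable (Spec_order_column_by_project_order project_ordered projects_to_order out) := by unfold Spec_order_column_by_project_order; infer_instance

-- ===== CLAIM =====
def Claim_equal_order_column_by_project_order : Prop := ∀ (project_ordered : List (List (String × String))) (projects_to_order : List (String × List String)), Dom_order_column_by_project_order project_ordered projects_to_order → Pre_order_column_by_project_order project_ordered projects_to_order → Spec_order_column_by_project_order project_ordered projects_to_order (order_column_by_project_order project_ordered projects_to_order)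

-- ===== LEMMAS AND PROOFS =====

-- the blocks of ys, one per key value, in the order of vs
def pvBlocks (k : String → Int) (vs : List Int) (ys : List String) : List String :=
  (vs.map (fun v => ys.filter (fun y => k y == v))).flatten

theorem pvInsertBy_nil (before : String → String → Bool) (x : String) :
    PySem.List.insertBy before x [] = [x] := rfl

theorem pvInsertBy_cons (before : String → String → Bool) (x y : String) (ys : List String) :
    PySem.List.insertBy before x (y :: ys) =
      if before x y then x :: y :: ys else y :: PySem.List.insertBy before x ys := rfl

theorem pvInsertBy_middle (before : String → String → Bool) (x : String) :
    ∀ (L R : List String), (∀ y ∈ L, before x y = false) →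
    (∀ y, R.head? = some y → before x y = true) →
    PySem.List.insertBy before x (L ++ R) = L ++ x :: R := by
  intro L
  induction L with
  | nil =>
    intro R _ hR
    cases R with
    | nil => simp [pvInsertBy_nil]
    | cons r rs => simp [pvInsertBy_cons, hR r rfl]
  | cons a L ih =>
    intro R hL hR
    have ha : before x a = false := hL a (by simp)
    simp [pvInsertBy_cons, ha, ih R (fun y hy => hL y (by simp [hy])) hR]

theorem pvBlocks_key_mem (k : String → Int) (vs : List Int) (ys : List String) (y : String)
    (hy : y ∈ pvBlocks k vs ys) : k y ∈ vs := by
  simp only [pvBlocks, List.mem_flatten, List.mem_map] at hy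
  obtain ⟨l, ⟨v, hv, rfl⟩, hyl⟩ := hy
  simp only [List.mem_filter, beq_iff_eq] at hyl
  exact hyl.2 ▸ hv

theorem pvBlocks_step (k : String → Int) (vs : List Int) (ys : List String) (x : String)
    (hvs : vs.Pairwise (· < ·)) (hx : k x ∈ vs) :
    PySem.List.insertBy (fun a b => decide (k a < k b)) x (pvBlocks k vs ys) =
      pvBlocks k vs (ys ++ [x]) := by
  obtain ⟨vs1, vs2, rfl⟩ := List.append_of_mem hx
  rw [List.pairwise_append] at hvs
  obtain ⟨h1, h2, h12⟩ := hvs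
  have h1lt : ∀ v ∈ vs1, v < k x := fun v hv => h12 v hv (k x) (by simp)
  have h2gt : ∀ v ∈ vs2, k x < v := fun v hv => (List.pairwise_cons.mp h2).1 v hv
  have hL : ∀ y ∈ pvBlocks k vs1 ys ++ ys.filter (fun y => k y == k x),
      (fun a b => decide (k a < k b)) x y = false := by
    intro y hy
    simp only [List.mem_append] at hy
    rcases hy with hy | hy
    · have := pvBlocks_key_mem k vs1 ys y hy
      simp only [decide_eq_false_iff_not, not_lt]
      exact le_of_lt (h1lt _ this)
    · simp only [List.mem_filter, beq_iff_eq] at hy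
      simp [hy.2]
  have hR : ∀ y, (pvBlocks k vs2 ys).head? = some y →
      (fun a b => decide (k a < k b)) x y = true := by
    intro y hy
    have hmem : y ∈ pvBlocks k vs2 ys := List.mem_of_mem_head? hy
    have := pvBlocks_key_mem k vs2 ys y hmem
    simp [h2gt _ this]
  have key : pvBlocks k (vs1 ++ k x :: vs2) ys =
      (pvBlocks k vs1 ys ++ ys.filter (fun y => k y == k x)) ++ pvBlocks k vs2 ys := by
    simp [pvBlocks, List.map_append, List.flatten_append, List.append_assoc]
  rw [key, pvInsertBy_middle _ _ _ _ hL hR]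
  have hfilter_ne : ∀ v ∈ vs1 ++ vs2, ((ys ++ [x]).filter (fun y => k y == v)) = ys.filter (fun y => k y == v) := by
    intro v hv
    have hne : k x ≠ v := by
      rcases List.mem_append.mp hv with hv | hv
      · exact ne_of_gt (h1lt _ hv)
      · exact ne_of_lt (h2gt _ hv)
    simp [List.filter_append, hne]
  have hfilter_eq : ((ys ++ [x]).filter (fun y => k y == k x)) = ys.filter (fun y => k y == k x) ++ [x] := by
    simp [List.filter_append]
  simp only [pvBlocks, List.map_append, List.map_cons, List.flatten_append, List.flatten_cons]
  rw [hfilter_eq]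
  rw [List.map_congr_left (fun v hv => hfilter_ne v (List.mem_append_left _ hv)),
      List.map_congr_left (fun v hv => hfilter_ne v (List.mem_append_right _ hv))]
  simp [List.append_assoc]

theorem pvSorted_eq_blocks (k : String → Int) (vs : List Int) (xs : List String)
    (hvs : vs.Pairwise (· < ·)) (hall : ∀ y ∈ xs, k y ∈ vs) :
    PySem.List.sorted xs k false = pvBlocks k vs xs := by
  have gen : ∀ (l ys : List String), (∀ y ∈ l, k y ∈ vs) →
      l.foldl (fun acc x => PySem.List.insertBy (fun a b => decide (k a < k b)) x acc)
        (pvBlocks k vs ys) = pvBlocks k vs (ys ++ l) := by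
    intro l
    induction l with
    | nil => intro ys _; simp
    | cons x l ih =>
      intro ys hl
      simp only [List.foldl_cons]
      rw [pvBlocks_step k vs ys x hvs (hl x (by simp))]
      rw [ih (ys ++ [x]) (fun y hy => hl y (by simp [hy]))]
      simp
  have base : pvBlocks k vs [] = [] := by simp [pvBlocks]
  rw [PySem.List.sorted_eq_foldl_insertBy]
  have := gen xs [] hall
  rw [base] at this
  simpa using this

theorem pvFoldl_insert_range (P : Int → Prop) :
    ∀ (l : List (Int × List (String × String))) (d : PySem.Dict String Int),
    (∀ p i, d.get? p = some i → P i) → (∀ ip ∈ l, P ip.1) →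
    ∀ p i, (l.foldl (fun d ip => d.insert ((PySem.Dict.ofList ip.2).getD "name" "") ip.1) d).get? p = some i → P i := by
  intro l
  induction l with
  | nil => intro d hd _ p i h; exact hd p i h
  | cons a l ih =>
    intro d hd hl p i h
    refine ih _ ?_ (fun ip hip => hl ip (by simp [hip])) p i h
    intro q j hq
    rw [PySem.Dict.get?_insert] at hq
    split at hq
    · cases hq; exact hl a (by simp)
    · exact hd q j hq

theorem pvIndexMap_range (project_ordered : List (List (String × String))) :
    ∀ p i, (pvIndexMap project_ordered).get? p = some i →
      0 ≤ i ∧ i < (project_ordered.length : Int) := by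
  intro p i h
  refine pvFoldl_insert_range (fun i => 0 ≤ i ∧ i < (project_ordered.length : Int)) _ PySem.Dict.empty (by intro q j hq; simp [PySem.Dict.empty, PySem.Dict.get?] at hq) ?_ p i h
  intro ip hip
  rw [PySem.List.mem_enumerate_iff] at hip
  obtain ⟨m, hm, rfl⟩ := hip
  constructor <;> omega

theorem pvBucket_fold (rank : PySem.Dict String Int) (pl : List String)
    (hr : ∀ p i, rank.get? p = some i → 0 ≤ i) :
    ∀ (u0 : List String) (b0 : List (List String)),
    (∀ p i, rank.get? p = some i → i.toNat < b0.length) →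
    pl.foldl (pvBucketStep rank) (u0, b0) =
      (u0 ++ pl.filter (fun p => (rank.get? p).isNone),
       b0.zipIdx.map (fun aj => aj.1 ++ pl.filter (fun p => rank.get? p == some (aj.2 : Int)))) := by
  induction pl with
  | nil =>
    intro u0 b0 _
    apply Prod.ext
    · simp
    · simp
  | cons p pl ih =>
    intro u0 b0 hb
    simp only [List.foldl_cons]
    rcases hg : rank.get? p with _ | i
    · rw [show pvBucketStep rank (u0, b0) p = (u0 ++ [p], b0) by simp [pvBucketStep, hg]]
      rw [ih (u0 ++ [p]) b0 hb]
      apply Prod.ext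
      · simp [hg]
      · simp only []
        apply List.map_congr_left
        intro aj _
        simp [hg]
    · have hi0 : (0:Int) ≤ i := hr p i hg
      have hilt : i.toNat < b0.length := hb p i hg
      rw [show pvBucketStep rank (u0, b0) p = (u0, b0.modify i.toNat (· ++ [p])) by simp [pvBucketStep, hg]]
      rw [ih u0 _ (by intro q j hq; simpa [List.length_modify] using hb q j hq)]
      apply Prod.ext
      · simp [hg]
      · simp only []
        apply List.ext_getElem
        · simp [List.length_modify]
        · intro j hj1 hj2
          simp only [List.getElem_map, List.getElem_zipIdx] at *
          rw [List.getElem_modify]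
          have hlen : j < b0.length := by simpa [List.length_modify] using hj1
          simp only [Nat.zero_add] at *
          rw [List.filter_cons]
          by_cases hji : i.toNat = j
          · have hb1 : (rank.get? p == some ((j : Int))) = true := by
              simp [hg]; omega
            rw [hb1]
            simp [hji, List.append_assoc]
          · have hb2 : (rank.get? p == some ((j : Int))) = false := by
              simp [hg]; omega
            rw [hb2]
            simp [hji]

theorem pvColumn_eq (project_ordered : List (List (String × String))) (pl : List String) :
    PySem.List.sorted pl (fun p => (pvIndexMap project_ordered).getD p (-1)) false =
      (pl.foldl (pvBucketStep (pvIndexMap project_ordered))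
        ([], List.replicate project_ordered.length [])).1 ++
      (pl.foldl (pvBucketStep (pvIndexMap project_ordered))
        ([], List.replicate project_ordered.length [])).2.flatten := by
  set rank := pvIndexMap project_ordered with hrank
  set n := project_ordered.length with hn
  set k : String → Int := fun p => rank.getD p (-1) with hk
  have hrange : ∀ p i, rank.get? p = some i → 0 ≤ i ∧ i < (n : Int) :=
    pvIndexMap_range project_ordered
  have hgetd : ∀ p, k p = (rank.get? p).getD (-1) := by
    intro p; simp [hk, PySem.Dict.getD_eq_get?_getD]
  set vs : List Int := -1 :: (List.range n).map (Nat.cast : Nat → Int) with hvs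
  have hpw : vs.Pairwise (· < ·) := by
    rw [hvs, List.pairwise_cons]
    constructor
    · intro v hv
      simp only [List.mem_map, List.mem_range] at hv
      obtain ⟨j, _, rfl⟩ := hv
      omega
    · rw [List.pairwise_map]
      exact List.pairwise_lt_range.imp (fun h => by exact_mod_cast h)
  have hall : ∀ y ∈ pl, k y ∈ vs := by
    intro y _
    rw [hgetd y]
    rcases hg : rank.get? y with _ | i
    · simp [hvs]
    · obtain ⟨h0, hlt⟩ := hrange y i hg
      simp only [hvs, Option.getD_some, List.mem_cons, List.mem_map, List.mem_range]
      right
      exact ⟨i.toNat, by omega, by omega⟩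
  rw [pvSorted_eq_blocks k vs pl hpw hall]
  rw [pvBucket_fold rank pl (fun p i h => (hrange p i h).1) []
      (List.replicate n [])
      (by intro p i h; have := hrange p i h; simp only [List.length_replicate]; omega)]
  simp only [pvBlocks, hvs, List.map_cons, List.flatten_cons, List.nil_append]
  congr 1
  · apply List.filter_congr
    intro y _
    rw [hgetd y]
    rcases hg : rank.get? y with _ | i
    · simp
    · have := (hrange y i hg).1
      simp only [Option.getD_some]
      simp
      omega
  · congr 1
    apply List.ext_getElem
    · simp
    · intro j hj1 hj2
      simp only [List.getElem_map, List.getElem_zipIdx, List.getElem_replicate,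
        List.nil_append, List.getElem_range, Nat.zero_add]
      apply List.filter_congr
      intro y _
      rcases hg : rank.get? y with _ | i
      · rw [hgetd y, hg]
        simp
      · rw [hgetd y, hg]
        simp

-- ===== VERDICT =====
theorem order_column_by_project_order_spec : Claim_equal_order_column_by_project_order := by
  intro po pto _hdom _hpre
  unfold Spec_order_column_by_project_order
  unfold order_column_by_project_order order_column_by_project_order_alt
  simp only []
  congr 1
  apply PySem.List.foldl_congr_mem
  intro acc cp _hcp
  congr 1
  exact pvColumn_eq po cp.2
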